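-- pv_equiv track=rewrite | github.com/spamegg1/reviews | courses/Nand2Tetris/projects/10/jack_tokenizer.py | split_symbols
-- ===== SOURCE A (Python) =====
-- SYMBOLS = ['{', '}', '(', ')', '[', ']', '.', ',', ';', '+', '-', '*', '/',
--            '&', '|', '<', '>', '=', '~']
--
-- def split_symbols(word):
--     """Takes string as input, returns list of strings from original string
--     separated by symbols.
--     Example: 'Square.new(0,' -> ['Square', '.', 'new', '(', '0', ','] """
--     # initialize list to be returned
--     tokens = []
--
--     # go through word letter by letter, look for symbols
--     i = 0  # loop index var
--     j = 0  # keeps track of the end of last token found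
--     k = 0  # keeps track of the start of very last token
--     while i < len(word):
--         if word[i] in SYMBOLS:
--             if j != i:
--                 tokens.append(word[j:i])
--             tokens.append(word[i])
--             j = i + 1  # beginning of next token
--             k = j  # very last token after the very last symbol occurence
--         i += 1
--
--     # add the very last token that comes after the very last symbol occurence
--     if k < len(word):
--         tokens.append(word[k:])
--
--     return tokens
-- ===== SOURCE B (Python) =====
-- SYMBOLS = ['{', '}', '(', ')', '[', ']', '.', ',', ';', '+', '-', '*', '/',
--            '&', '|', '<', '>', '=', '~']
--
-- def split_symbols(word):
--     """Single left fold over the characters with a pending-run buffer: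
--     no index bookkeeping, no slicing."""
--     tokens = []
--     cur = []
--     for ch in word:
--         if ch in SYMBOLS:
--             if cur:
--                 tokens.append(''.join(cur))
--                 cur = []
--             tokens.append(ch)
--         else:
--             cur.append(ch)
--     if cur:
--         tokens.append(''.join(cur))
--     return tokens
-- ===== Notes on version B (the rewrite author's own statement) =====
-- stated objective: simpler
-- what changed: Replaced the three-index (i/j/k) while-loop with slice extraction by a single fold over the characters that keeps a pending-run buffer and flushes it at each symbol and at the end.
import Mathlib
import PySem

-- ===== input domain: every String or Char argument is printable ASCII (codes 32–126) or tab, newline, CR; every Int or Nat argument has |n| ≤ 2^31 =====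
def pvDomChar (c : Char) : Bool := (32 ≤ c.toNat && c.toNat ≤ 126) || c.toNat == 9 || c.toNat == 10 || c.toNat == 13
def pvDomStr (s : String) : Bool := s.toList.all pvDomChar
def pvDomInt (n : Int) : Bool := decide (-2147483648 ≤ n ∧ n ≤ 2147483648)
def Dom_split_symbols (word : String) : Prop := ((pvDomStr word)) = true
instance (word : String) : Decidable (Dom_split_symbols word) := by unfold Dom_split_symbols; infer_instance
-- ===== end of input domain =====

-- B replaces A's three-index while-loop and slicing by a single fold with a pending-run buffer (simpler decomposition, same O(n) cost).

-- ===== PORT A =====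
def pvSymbols : List Char :=
  ['{', '}', '(', ')', '[', ']', '.', ',', ';', '+', '-', '*', '/',
   '&', '|', '<', '>', '=', '~']

-- the while-loop of A: index i, token-start trackers j and k, accumulator tokens;
-- word[j:i] (0 ≤ j ≤ i ≤ len) is exactly (cs.drop j).take (i - j)
def splitA_loop (cs : List Char) (i j k : Nat) (tokens : List String) : List String × Nat :=
  if h : i < cs.length then
    let c := cs[i]
    if c ∈ pvSymbols then
      let tokens := if j ≠ i then tokens ++ [String.ofList ((cs.drop j).take (i - j))] else tokens
      splitA_loop cs (i + 1) (i + 1) (i + 1) (tokens ++ [String.ofList [c]])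
    else
      splitA_loop cs (i + 1) j k tokens
  else (tokens, k)
termination_by cs.length - i

def split_symbols (word : String) : List String :=
  let cs := word.toList
  let r := splitA_loop cs 0 0 0 []
  -- final: if k < len(word): tokens.append(word[k:])
  if r.2 < cs.length then r.1 ++ [String.ofList (cs.drop r.2)] else r.1

-- ===== PORT B =====
-- one step of B's for-loop: state = (tokens, cur)
def splitB_step (st : List String × List Char) (ch : Char) : List String × List Char :=
  if ch ∈ pvSymbols then
    let tokens := if st.2 ≠ [] then st.1 ++ [String.ofList st.2] else st.1
    (tokens ++ [String.ofList [ch]], [])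
  else (st.1, st.2 ++ [ch])

def split_symbols_alt (word : String) : List String :=
  let r := word.toList.foldl splitB_step ([], [])
  if r.2 ≠ [] then r.1 ++ [String.ofList r.2] else r.1

-- ===== PRECONDITION & SPEC =====
def Spec_split_symbols (word : String) (out : List String) : Prop := out = split_symbols_alt word
instance (word : String) (out : List String) : Decidable (Spec_split_symbols word out) := by unfold Spec_split_symbols; infer_instance

-- ===== CLAIM (what is proved, stated in full; the proofs are below) =====
def Claim_equal_split_symbols : Prop := ∀ (word : String), Dom_split_symbols word → Spec_split_symbols word (split_symbols word)

-- ===== LEMMAS AND PROOFS =====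

-- invariant: A's loop from state (i, j, j, tokens), followed by A's final flush,
-- equals B's fold over the remaining characters starting from buffer word[j:i]
theorem loop_eq (cs : List Char) (i j : Nat) (tokens : List String)
    (hji : j ≤ i) (hil : i ≤ cs.length) :
    (let r := splitA_loop cs i j j tokens
     if r.2 < cs.length then r.1 ++ [String.ofList (cs.drop r.2)] else r.1)
    =
    (let r := (cs.drop i).foldl splitB_step (tokens, (cs.drop j).take (i - j))
     if r.2 ≠ [] then r.1 ++ [String.ofList r.2] else r.1) := by
  by_cases h : i < cs.length
  · have hdrop : cs.drop i = cs[i] :: cs.drop (i + 1) := List.drop_eq_getElem_cons h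
    rw [splitA_loop, dif_pos h, hdrop]
    by_cases hs : cs[i] ∈ pvSymbols
    · simp only [if_pos hs, List.foldl_cons]
      have hcur : ((cs.drop j).take (i - j) ≠ []) ↔ j ≠ i := by
        constructor
        · intro hne heq; subst heq; simp at hne
        · intro hne
          have hj : j < i := lt_of_le_of_ne hji hne
          have : (cs.drop j) ≠ [] := by
            simp only [ne_eq, List.drop_eq_nil_iff]; omega
          simp only [ne_eq, List.take_eq_nil_iff]
          push Not
          exact ⟨by omega, this⟩
      have hstep : splitB_step (tokens, (cs.drop j).take (i - j)) cs[i]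
          = ((if j ≠ i then tokens ++ [String.ofList ((cs.drop j).take (i - j))] else tokens)
              ++ [String.ofList [cs[i]]], []) := by
        simp only [splitB_step, if_pos hs]
        by_cases hji' : j ≠ i
        · rw [if_pos (hcur.mpr hji'), if_pos hji']
        · rw [if_neg (by simpa using hcur.not.mpr (by simpa using hji')), if_neg hji']
      rw [hstep]
      have := loop_eq cs (i + 1) (i + 1)
        ((if j ≠ i then tokens ++ [String.ofList ((cs.drop j).take (i - j))] else tokens)
          ++ [String.ofList [cs[i]]]) (le_refl _) (by omega)
      simpa using this
    · simp only [if_neg hs, List.foldl_cons]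
      have hstep : splitB_step (tokens, (cs.drop j).take (i - j)) cs[i]
          = (tokens, (cs.drop j).take (i + 1 - j)) := by
        simp only [splitB_step, if_neg hs]
        have hlen : i - j < (cs.drop j).length := by
          simp only [List.length_drop]; omega
        have : (cs.drop j).take (i - j) ++ [cs[i]] = (cs.drop j).take (i - j + 1) := by
          rw [List.take_add_one]
          have : (cs.drop j)[i - j]? = some cs[i] := by
            rw [List.getElem?_drop]
            have : j + (i - j) = i := by omega
            rw [this, List.getElem?_eq_getElem h]
          rw [this]; rfl
        rw [this]
        have : i + 1 - j = i - j + 1 := by omega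
        rw [this]
      rw [hstep]
      exact loop_eq cs (i + 1) j tokens (by omega) (by omega)
  · have hi : i = cs.length := by omega
    rw [splitA_loop, dif_neg h]
    subst hi
    simp only [List.drop_length, List.foldl_nil]
    have htake : (cs.drop j).take (cs.length - j) = cs.drop j := by
      apply List.take_of_length_le
      simp [List.length_drop]
    rw [htake]
    by_cases hj : j < cs.length
    · rw [if_pos hj, if_pos (by simp only [ne_eq, List.drop_eq_nil_iff]; omega)]
    · rw [if_neg hj, if_neg (by simp only [ne_eq, List.drop_eq_nil_iff, not_not]; omega)]
termination_by cs.length - i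

-- ===== VERDICT (by name: the statement is the Claim_ definition above) =====
theorem split_symbols_spec : Claim_equal_split_symbols := by
  intro word _
  show split_symbols word = split_symbols_alt word
  have := loop_eq word.toList 0 0 [] (le_refl 0) (Nat.zero_le _)
  simpa [split_symbols, split_symbols_alt] using this
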